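-- pv_equiv track=rewrite | github.com/lukacf/mcp-the-force | scripts/neutrinotree.py | _seq_to_range
-- ===== SOURCE A (Python) =====
-- from typing import Any, Dict, List, Set, Tuple
--
-- def _seq_to_range(entries: List[Tuple[int, bool]]) -> Tuple[str, str]:
--     # ranges
--     nums = [n for n, _ in entries]
--     nums.sort()
--     merged, start = [], nums[0]
--     for idx in range(1, len(nums)):
--         if nums[idx] != nums[idx - 1] + 1:
--             merged.append((start, nums[idx - 1]))
--             start = nums[idx]
--     merged.append((start, nums[-1]))
--     range_str = ",".join(f"{a}-{b}" if a != b else f"{a}" for a, b in merged)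
--
--     # star indexes relative to start of seq (1‑based)
--     stars = [i + 1 for i, (_, s) in enumerate(entries) if s]
--     star_str = ",".join(_ranges_from_sorted(stars)) if stars else ""
--     return range_str, star_str
--
-- def _ranges_from_sorted(nums: List[int]) -> List[str]:
--     if not nums:
--         return []
--     out, start = [], nums[0]
--     for idx in range(1, len(nums)):
--         if nums[idx] != nums[idx - 1] + 1:
--             out.append(
--                 f"{start}-{nums[idx-1]}" if start != nums[idx - 1] else f"{start}"
--             )
--             start = nums[idx]
--     out.append(f"{start}-{nums[-1]}" if start != nums[-1] else f"{start}")
--     return out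
-- ===== SOURCE B (Python) =====
-- from typing import List, Tuple
--
-- def _segments(nums: List[int]) -> List[Tuple[int, int]]:
--     # Build (start, end) segments back-to-front: walk the list in reverse and
--     # either extend the current front segment or prepend a fresh singleton.
--     segs: List[Tuple[int, int]] = []
--     for x in reversed(nums):
--         if segs and segs[0][0] == x + 1:
--             segs[0] = (x, segs[0][1])
--         else:
--             segs[0:0] = [(x, x)]
--     return segs
--
-- def _fmt(seg: Tuple[int, int]) -> str:
--     a, b = seg
--     return f"{a}-{b}" if a != b else f"{a}"
--
-- def _seq_to_range(entries: List[Tuple[int, bool]]) -> Tuple[str, str]: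
--     nums = sorted(n for n, _ in entries)
--     stars = [i + 1 for i, (_, s) in enumerate(entries) if s]
--     return (",".join(map(_fmt, _segments(nums))),
--             ",".join(map(_fmt, _segments(stars))))
-- ===== Notes on version B (the rewrite author's own statement) =====
-- stated objective: simpler
-- what changed: Replaces A's two index-driven left-to-right merging loops (one for numbers, a duplicated helper for stars, each tracking a 'start' sentinel and patching on the last element after the loop) by a single back-to-front right fold that builds the (start, end) segments directly, shared by both components.
import Mathlib
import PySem

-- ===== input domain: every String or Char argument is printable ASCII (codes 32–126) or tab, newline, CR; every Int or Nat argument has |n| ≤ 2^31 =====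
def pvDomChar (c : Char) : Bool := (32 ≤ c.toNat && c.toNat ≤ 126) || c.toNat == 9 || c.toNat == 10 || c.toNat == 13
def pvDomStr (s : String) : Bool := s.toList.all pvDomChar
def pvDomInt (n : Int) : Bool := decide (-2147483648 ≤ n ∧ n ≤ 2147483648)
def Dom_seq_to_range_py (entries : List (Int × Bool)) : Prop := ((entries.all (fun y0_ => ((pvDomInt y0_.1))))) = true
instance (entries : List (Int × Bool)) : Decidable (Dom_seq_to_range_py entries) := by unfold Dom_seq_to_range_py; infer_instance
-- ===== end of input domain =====

-- B replaces A's index-driven left-to-right loops (and the duplicated range-merging logic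
-- for the star part) by one back-to-front fold that builds (start, end) segments directly;
-- objective: simpler. Pre_ excludes the empty list, on which A raises IndexError.

-- ===== PORT A =====
-- the 'for idx in range(1, len(nums))' merging loop of _seq_to_range (state: merged, start),
-- plus the final append of (start, nums[-1]) done at the call site
def aMerge (nums : List Int) : List (Int × Int) × Int :=
  (PySem.List.pyRange 1 (PySem.List.len nums)).foldl
    (fun (st : List (Int × Int) × Int) idx =>
      if PySem.List.pyGetD nums idx 0 ≠ PySem.List.pyGetD nums (idx - 1) 0 + 1 then
        (st.1 ++ [(st.2, PySem.List.pyGetD nums (idx - 1) 0)], PySem.List.pyGetD nums idx 0)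
      else st)
    ([], PySem.List.pyGetD nums 0 0)

-- _ranges_from_sorted, transliterated (same loop shape, builds the strings directly)
def ranges_from_sorted (nums : List Int) : List String :=
  if nums = [] then []
  else
    let res := (PySem.List.pyRange 1 (PySem.List.len nums)).foldl
      (fun (st : List String × Int) idx =>
        if PySem.List.pyGetD nums idx 0 ≠ PySem.List.pyGetD nums (idx - 1) 0 + 1 then
          (st.1 ++ [if st.2 ≠ PySem.List.pyGetD nums (idx - 1) 0 then
                      PySem.Int.toStr st.2 ++ "-" ++ PySem.Int.toStr (PySem.List.pyGetD nums (idx - 1) 0)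
                    else PySem.Int.toStr st.2], PySem.List.pyGetD nums idx 0)
        else st)
      ([], PySem.List.pyGetD nums 0 0)
    res.1 ++ [if res.2 ≠ PySem.List.pyGetD nums (-1) 0 then
                PySem.Int.toStr res.2 ++ "-" ++ PySem.Int.toStr (PySem.List.pyGetD nums (-1) 0)
              else PySem.Int.toStr res.2]

def seq_to_range_py (entries : List (Int × Bool)) : String × String :=
  let nums := PySem.List.sorted (entries.map (fun e => e.1)) (fun x => x) false
  -- nums[0] raises IndexError when entries = [] → excluded by Pre_
  let res := aMerge nums
  let merged := res.1 ++ [(res.2, PySem.List.pyGetD nums (-1) 0)]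
  let range_str := PySem.Str.join ","
    (merged.map (fun ab => if ab.1 ≠ ab.2 then
        PySem.Int.toStr ab.1 ++ "-" ++ PySem.Int.toStr ab.2 else PySem.Int.toStr ab.1))
  let stars := (PySem.List.enumerate entries).filterMap
    (fun p => if p.2.2 then some (p.1 + 1) else none)
  let star_str := if stars ≠ [] then PySem.Str.join "," (ranges_from_sorted stars) else ""
  (range_str, star_str)

-- ===== PORT B =====
-- the reversed-loop body of _segments: extend the front segment or prepend a singleton
def segB (x : Int) (acc : List (Int × Int)) : List (Int × Int) :=
  match acc with
  | (a, b) :: rest => if a = x + 1 then (x, b) :: rest else (x, x) :: (a, b) :: rest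
  | [] => [(x, x)]

def fmtB (seg : Int × Int) : String :=
  if seg.1 ≠ seg.2 then PySem.Int.toStr seg.1 ++ "-" ++ PySem.Int.toStr seg.2
  else PySem.Int.toStr seg.1

def seq_to_range_py_alt (entries : List (Int × Bool)) : String × String :=
  let nums := PySem.List.sorted (entries.map (fun e => e.1)) (fun x => x) false
  let stars := (PySem.List.enumerate entries).filterMap
    (fun p => if p.2.2 then some (p.1 + 1) else none)
  -- 'for x in reversed(nums)' with prepend/extend at the front is a right fold
  (PySem.Str.join "," ((nums.foldr segB []).map fmtB),
   PySem.Str.join "," ((stars.foldr segB []).map fmtB))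

-- ===== PRECONDITION & SPEC =====
-- Pre_ excludes exactly the empty list, on which A's nums[0] raises IndexError
def Pre_seq_to_range_py (entries : List (Int × Bool)) : Prop := entries ≠ []
instance (entries : List (Int × Bool)) : Decidable (Pre_seq_to_range_py entries) := by
  unfold Pre_seq_to_range_py; infer_instance

def pvWitness_seq_to_range_py : (List (Int × Bool)) := [(1, true), (3, false), (2, false)]

def Spec_seq_to_range_py (entries : List (Int × Bool)) (out : String × String) : Prop :=
  out = seq_to_range_py_alt entries
instance (entries : List (Int × Bool)) (out : String × String) :
    Decidable (Spec_seq_to_range_py entries out) := by unfold Spec_seq_to_range_py; infer_instance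

-- ===== CLAIM (what is proved, stated in full; the proofs are below) =====
def Claim_equal_seq_to_range_py : Prop := ∀ (entries : List (Int × Bool)),
  Dom_seq_to_range_py entries → Pre_seq_to_range_py entries →
  Spec_seq_to_range_py entries (seq_to_range_py entries)

-- ===== LEMMAS AND PROOFS =====

-- the common reference shape: maximal segments of a scan carrying (start, prev)
def segs (start prev : Int) : List Int → List (Int × Int)
  | [] => [(start, prev)]
  | x :: xs => if x ≠ prev + 1 then (start, prev) :: segs x x xs else segs start x xs

-- generic left scan carrying the previous element
def loopZ {σ : Type} (g : σ → Int → Int → σ) : σ → Int → List Int → σ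
  | st, _, [] => st
  | st, prev, x :: xs => loopZ g (g st prev x) x xs

-- A's two loop bodies, as functions of (state, nums[idx-1], nums[idx])
def gP (st : List (Int × Int) × Int) (p x : Int) : List (Int × Int) × Int :=
  if x ≠ p + 1 then (st.1 ++ [(st.2, p)], x) else st

def gS (st : List String × Int) (p x : Int) : List String × Int :=
  if x ≠ p + 1 then
    (st.1 ++ [if st.2 ≠ p then PySem.Int.toStr st.2 ++ "-" ++ PySem.Int.toStr p
              else PySem.Int.toStr st.2], x)
  else st

-- the 'for idx in range(1, len(nums))' fold reading nums[idx-1], nums[idx] is loopZ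
theorem pyfold_loopZ {σ : Type} (g : σ → Int → Int → σ) :
    ∀ (t : List Int) (h : Int) (st : σ),
      (PySem.List.pyRange 1 (PySem.List.len (h :: t))).foldl
        (fun st i => g st (PySem.List.pyGetD (h :: t) (i - 1) 0)
                          (PySem.List.pyGetD (h :: t) i 0)) st
      = loopZ g st h t := by
  intro t
  induction t with
  | nil =>
    intro h st
    rw [PySem.List.pyRange_one_eq_nil (by simp [pysem])]
    rfl
  | cons x xs ih =>
    intro h st
    rw [PySem.List.pyRange_one_cons (by simp [pysem])]
    simp only [List.foldl_cons]
    have h1 : g st (PySem.List.pyGetD (h :: x :: xs) (1 - 1) 0)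
                  (PySem.List.pyGetD (h :: x :: xs) 1 0) = g st h x := by
      norm_num [pysem]
    rw [h1]
    have hx := ih x (g st h x)
    rw [PySem.List.pyRange_one 1 _] at hx
    rw [PySem.List.pyRange_one (1 + 1) _]
    have hlen1 : ((PySem.List.len (h :: x :: xs)) - (1 + 1)).toNat = xs.length := by
      simp only [PySem.List.len_eq, List.length_cons]; omega
    have hlen2 : ((PySem.List.len (x :: xs)) - 1).toNat = xs.length := by
      simp only [PySem.List.len_eq, List.length_cons]; omega
    rw [hlen1]; rw [hlen2] at hx
    rw [List.foldl_map]; rw [List.foldl_map] at hx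
    rw [show loopZ g st h (x :: xs) = loopZ g (g st h x) x xs from rfl]
    rw [← hx]
    apply PySem.List.foldl_congr_mem
    intro acc k _
    have e1 : (1 + 1 + (k : Int) - 1) = ((k + 1 : Nat) : Int) := by omega
    have e2 : (1 + 1 + (k : Int)) = ((k + 2 : Nat) : Int) := by omega
    have e3 : (1 + (k : Int) - 1) = ((k : Nat) : Int) := by omega
    have e4 : (1 + (k : Int)) = ((k + 1 : Nat) : Int) := by omega
    rw [e1, e2, e3, e4, PySem.List.pyGetD_natCast, PySem.List.pyGetD_natCast,
        PySem.List.pyGetD_natCast, PySem.List.pyGetD_natCast]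
    simp [List.getD]

theorem loopZ_gP : ∀ (t : List Int) (prev start : Int) (m : List (Int × Int)),
    (loopZ gP (m, start) prev t).1 ++ [((loopZ gP (m, start) prev t).2, t.getLastD prev)]
      = m ++ segs start prev t := by
  intro t
  induction t with
  | nil => intro prev start m; simp [loopZ, segs]
  | cons x xs ih =>
    intro prev start m
    by_cases hx : x ≠ prev + 1
    · rw [show loopZ gP (m, start) prev (x :: xs)
            = loopZ gP (m ++ [(start, prev)], x) x xs from by simp [loopZ, gP, hx]]
      rw [show (x :: xs).getLastD prev = xs.getLastD x from List.getLastD_cons ..]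
      rw [ih x x (m ++ [(start, prev)])]
      simp [segs, hx]
    · rw [show loopZ gP (m, start) prev (x :: xs)
            = loopZ gP (m, start) x xs from by simp [loopZ, gP, hx]]
      rw [show (x :: xs).getLastD prev = xs.getLastD x from List.getLastD_cons ..]
      rw [ih x start m]
      simp [segs, hx]

theorem loopZ_gS : ∀ (t : List Int) (prev start : Int) (m : List String),
    (loopZ gS (m, start) prev t).1 ++
      [if (loopZ gS (m, start) prev t).2 ≠ t.getLastD prev then
         PySem.Int.toStr (loopZ gS (m, start) prev t).2 ++ "-" ++ PySem.Int.toStr (t.getLastD prev)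
       else PySem.Int.toStr (loopZ gS (m, start) prev t).2]
      = m ++ (segs start prev t).map fmtB := by
  intro t
  induction t with
  | nil => intro prev start m; simp [loopZ, segs, fmtB]
  | cons x xs ih =>
    intro prev start m
    by_cases hx : x ≠ prev + 1
    · rw [show loopZ gS (m, start) prev (x :: xs)
            = loopZ gS (m ++ [fmtB (start, prev)], x) x xs from by simp [loopZ, gS, fmtB, hx]]
      rw [show (x :: xs).getLastD prev = xs.getLastD x from List.getLastD_cons ..]
      rw [ih x x (m ++ [fmtB (start, prev)])]
      simp [segs, hx]
    · rw [show loopZ gS (m, start) prev (x :: xs)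
            = loopZ gS (m, start) x xs from by simp [loopZ, gS, hx]]
      rw [show (x :: xs).getLastD prev = xs.getLastD x from List.getLastD_cons ..]
      rw [ih x start m]
      simp [segs, hx]

theorem segs_foldr_aux : ∀ (t : List Int) (prev start : Int),
    ∃ b r, (prev :: t).foldr segB [] = (prev, b) :: r ∧ segs start prev t = (start, b) :: r := by
  intro t
  induction t with
  | nil => intro prev start; exact ⟨prev, [], rfl, rfl⟩
  | cons x xs ih =>
    intro prev start
    obtain ⟨b, r, hf, hs⟩ := ih x x
    have hs' : ∀ s', segs s' x xs = (s', b) :: r := by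
      intro s'; obtain ⟨b', r', hf', hs''⟩ := ih x s'
      rw [hf'] at hf; cases hf; exact hs''
    by_cases hx : x = prev + 1
    · refine ⟨b, r, ?_, ?_⟩
      · rw [show ((prev :: x :: xs).foldr segB []) = segB prev ((x :: xs).foldr segB []) from rfl,
            hf]
        simp [segB, hx]
      · rw [show segs start prev (x :: xs)
              = if x ≠ prev + 1 then (start, prev) :: segs x x xs else segs start x xs from rfl,
            if_neg (by simp [hx])]
        exact hs' start
    · refine ⟨prev, (x, b) :: r, ?_, ?_⟩
      · rw [show ((prev :: x :: xs).foldr segB []) = segB prev ((x :: xs).foldr segB []) from rfl,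
            hf]
        simp [segB]
        omega
      · rw [show segs start prev (x :: xs)
              = if x ≠ prev + 1 then (start, prev) :: segs x x xs else segs start x xs from rfl]
        simp [hx, hs' x]

theorem foldr_segB_eq_segs (h : Int) (t : List Int) :
    (h :: t).foldr segB [] = segs h h t := by
  obtain ⟨b, r, hf, hs⟩ := segs_foldr_aux t h h
  rw [hf, hs]

theorem pyGetD_neg_one_getLastD (h : Int) (t : List Int) :
    PySem.List.pyGetD (h :: t) (-1) 0 = t.getLastD h := by
  simp [pysem]
  induction t generalizing h with
  | nil => simp
  | cons y ys ih =>
    simp only [List.length_cons, List.getElem_cons_succ, List.getLast?_cons] at *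
    simpa using ih y

theorem aMerge_eq (h : Int) (t : List Int) :
    (aMerge (h :: t)).1 ++ [((aMerge (h :: t)).2, PySem.List.pyGetD (h :: t) (-1) 0)]
      = segs h h t := by
  have e : (PySem.List.pyRange 1 (PySem.List.len (h :: t))).foldl
      (fun (st : List (Int × Int) × Int) idx =>
        if PySem.List.pyGetD (h :: t) idx 0 ≠ PySem.List.pyGetD (h :: t) (idx - 1) 0 + 1 then
          (st.1 ++ [(st.2, PySem.List.pyGetD (h :: t) (idx - 1) 0)],
            PySem.List.pyGetD (h :: t) idx 0)
        else st)
      ([], PySem.List.pyGetD (h :: t) 0 0)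
      = loopZ gP ([], PySem.List.pyGetD (h :: t) 0 0) h t :=
    pyfold_loopZ gP t h ([], PySem.List.pyGetD (h :: t) 0 0)
  rw [show aMerge (h :: t) = loopZ gP ([], PySem.List.pyGetD (h :: t) 0 0) h t from e]
  have hget0 : PySem.List.pyGetD (h :: t) 0 0 = h := PySem.List.pyGetD_zero_cons ..
  have hlast := pyGetD_neg_one_getLastD h t
  rw [hget0, hlast, loopZ_gP t h h []]
  simp

theorem rfs_eq (l : List Int) : ranges_from_sorted l = (l.foldr segB []).map fmtB := by
  cases l with
  | nil => rfl
  | cons h t =>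
    unfold ranges_from_sorted
    rw [if_neg (by simp)]
    have e : (PySem.List.pyRange 1 (PySem.List.len (h :: t))).foldl
        (fun (st : List String × Int) idx =>
          if PySem.List.pyGetD (h :: t) idx 0 ≠ PySem.List.pyGetD (h :: t) (idx - 1) 0 + 1 then
            (st.1 ++ [if st.2 ≠ PySem.List.pyGetD (h :: t) (idx - 1) 0 then
                        PySem.Int.toStr st.2 ++ "-" ++
                          PySem.Int.toStr (PySem.List.pyGetD (h :: t) (idx - 1) 0)
                      else PySem.Int.toStr st.2], PySem.List.pyGetD (h :: t) idx 0)
          else st)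
        ([], PySem.List.pyGetD (h :: t) 0 0)
        = loopZ gS ([], PySem.List.pyGetD (h :: t) 0 0) h t :=
      pyfold_loopZ gS t h ([], PySem.List.pyGetD (h :: t) 0 0)
    simp only []
    rw [e]
    have hget0 : PySem.List.pyGetD (h :: t) 0 0 = h := PySem.List.pyGetD_zero_cons ..
    have hlast := pyGetD_neg_one_getLastD h t
    rw [hget0, hlast, loopZ_gS t h h [], foldr_segB_eq_segs]
    simp

-- ===== VERDICT (by name: the statement is the Claim_ definition above) =====
theorem seq_to_range_py_spec : Claim_equal_seq_to_range_py := by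
  intro entries _ hpre
  unfold Spec_seq_to_range_py seq_to_range_py seq_to_range_py_alt
  have hne : entries ≠ [] := hpre
  obtain ⟨h, t, hnums⟩ : ∃ h t,
      PySem.List.sorted (entries.map (fun e => e.1)) (fun x => x) false = h :: t := by
    cases hs : PySem.List.sorted (entries.map (fun e => e.1)) (fun x => x) false with
    | nil =>
      exact absurd (List.map_eq_nil_iff.mp ((PySem.List.sorted_eq_nil_iff _ _ _).1 hs)) hne
    | cons h t => exact ⟨h, t, rfl⟩
  simp only [hnums, Prod.mk.injEq]
  constructor
  · rw [show ((aMerge (h :: t)).1 ++ [((aMerge (h :: t)).2, PySem.List.pyGetD (h :: t) (-1) 0)])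
          = segs h h t from aMerge_eq h t]
    rw [foldr_segB_eq_segs]
    exact congrArg _ (List.map_congr_left (fun ab _ => rfl))
  · set stars := (PySem.List.enumerate entries).filterMap
      (fun p => if p.2.2 then some (p.1 + 1) else none) with hstars
    by_cases hst : stars = []
    · rw [if_neg (by simp [hst])]
      rw [hst]
      rfl
    · rw [if_pos hst, rfs_eq]
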